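-- pv_equiv track=rewrite | github.com/esheldon/espy | curses_test.py | GetQstatStats
-- ===== SOURCE A (Python) =====
-- def GetQstatStats(sout, username):
--     # gather some statistics
--
--     sd={'njobs':0,
--         'nrun': 0,
--         'nq':0,
--         'nsusp':0,
--         'nexiting':0,
--         'nheld':0,
--         'nmoving':0,
--         'nwait':0}
--     for line in sout:
--         ls=line.split()
--
--         if len(ls) >= 11:
--             if ls[1] == username:
--                 sd['njobs'] += 1
--                 jobstat = ls[9]
--                 if jobstat == "R":
--                     sd['nrun'] += 1
--                 elif jobstat == "Q":
--                     sd['nq'] += 1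
--                 elif jobstat == "S":
--                     sd['nsusp'] += 1
--                 elif jobstat == "E":
--                     sd['nexiting'] += 1
--                 elif jobstat == "H":
--                     sd['nheld'] += 1
--                 elif jobstat == "T":
--                     sd['nmoving'] += 1
--                 elif jobstat == "W":
--                     sd['nwait'] += 1
--
--     return sd
-- ===== SOURCE B (Python) =====
-- def GetQstatStats(sout, username):
--     # Pass 1: collect the status letter of each line belonging to username.
--     statuses = [ls[9] for ls in (line.split() for line in sout)
--                 if len(ls) >= 11 and ls[1] == username]
--     # Pass 2: translate a fixed status-letter -> key table into the result dict.
--     mapping = (('R', 'nrun'), ('Q', 'nq'), ('S', 'nsusp'), ('E', 'nexiting'),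
--                ('H', 'nheld'), ('T', 'nmoving'), ('W', 'nwait'))
--     sd = {'njobs': len(statuses)}
--     for letter, key in mapping:
--         sd[key] = statuses.count(letter)
--     return sd
-- ===== Notes on version B (the rewrite author's own statement) =====
-- stated objective: idiomatic
-- what changed: Replaces the single-pass if/elif cascade over a pre-initialised 8-key dict by a two-phase decomposition: first collect the matching lines' status letters, then build the result from a fixed letter->key table using list.count.
import Mathlib
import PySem

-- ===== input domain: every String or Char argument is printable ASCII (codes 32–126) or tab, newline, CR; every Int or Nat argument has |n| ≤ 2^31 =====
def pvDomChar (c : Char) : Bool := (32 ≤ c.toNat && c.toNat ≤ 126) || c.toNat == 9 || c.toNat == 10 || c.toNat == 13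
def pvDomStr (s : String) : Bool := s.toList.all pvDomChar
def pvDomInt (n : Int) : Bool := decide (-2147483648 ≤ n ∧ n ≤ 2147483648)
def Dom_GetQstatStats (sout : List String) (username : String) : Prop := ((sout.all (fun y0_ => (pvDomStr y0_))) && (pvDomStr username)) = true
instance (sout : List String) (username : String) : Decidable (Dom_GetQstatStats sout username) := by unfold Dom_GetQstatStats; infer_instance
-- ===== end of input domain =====

-- B replaces A's single-pass if/elif cascade over a pre-initialised 8-key dict by a two-phase
-- decomposition (collect the matching lines' status letters, then build the dict from a fixed
-- letter->key table with list.count); objective: idiomatic, same cost. Both functions are total.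

-- ===== PORT A =====
-- per-line update of the stats dict (the body of A's for-loop); ls[1]/ls[9] are guarded by
-- len(ls) >= 11, so List.getD is exact there
def aStep (username : String) (sd : PySem.Dict String Int) (line : String) : PySem.Dict String Int :=
  let ls := PySem.Str.split₀ line
  if 11 ≤ ls.length then
    if ls.getD 1 "" == username then
      let sd := sd.modify "njobs" 0 (· + 1)
      let jobstat := ls.getD 9 ""
      if jobstat == "R" then sd.modify "nrun" 0 (· + 1)
      else if jobstat == "Q" then sd.modify "nq" 0 (· + 1)
      else if jobstat == "S" then sd.modify "nsusp" 0 (· + 1)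
      else if jobstat == "E" then sd.modify "nexiting" 0 (· + 1)
      else if jobstat == "H" then sd.modify "nheld" 0 (· + 1)
      else if jobstat == "T" then sd.modify "nmoving" 0 (· + 1)
      else if jobstat == "W" then sd.modify "nwait" 0 (· + 1)
      else sd
    else sd
  else sd

def GetQstatStats (sout : List String) (username : String) : List (String × Int) :=
  let sd0 : PySem.Dict String Int := PySem.Dict.ofList
    [("njobs", 0), ("nrun", 0), ("nq", 0), ("nsusp", 0),
     ("nexiting", 0), ("nheld", 0), ("nmoving", 0), ("nwait", 0)]
  (sout.foldl (aStep username) sd0).items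

-- ===== PORT B =====
-- pass 1 of Source B: the status letters of the lines that belong to username
def pvStatuses (sout : List String) (username : String) : List String :=
  (sout.map (fun line => PySem.Str.split₀ line)).filterMap
    (fun ls => if 11 ≤ ls.length ∧ ls.getD 1 "" == username then some (ls.getD 9 "") else none)

def GetQstatStats_alt (sout : List String) (username : String) : List (String × Int) :=
  let statuses := pvStatuses sout username
  let mapping : List (String × String) :=
    [("R", "nrun"), ("Q", "nq"), ("S", "nsusp"), ("E", "nexiting"),
     ("H", "nheld"), ("T", "nmoving"), ("W", "nwait")]
  let sd0 : PySem.Dict String Int := (PySem.Dict.empty).insert "njobs" (statuses.length : Int)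
  (mapping.foldl (fun sd p => sd.insert p.2 ((statuses.count p.1 : Int))) sd0).items

-- ===== PRECONDITION & SPEC =====
def Spec_GetQstatStats (sout : List String) (username : String) (out : List (String × Int)) : Prop := out = GetQstatStats_alt sout username
instance (sout : List String) (username : String) (out : List (String × Int)) : Decidable (Spec_GetQstatStats sout username out) := by unfold Spec_GetQstatStats; infer_instance

-- ===== CLAIM (what is proved, stated in full; the proofs are below) =====
def Claim_equal_GetQstatStats : Prop := ∀ (sout : List String) (username : String), Dom_GetQstatStats sout username → Spec_GetQstatStats sout username (GetQstatStats sout username)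

-- ===== LEMMAS AND PROOFS =====

-- the canonical shape of A's dict state
def mkSD (a b c d e f g h : Int) : PySem.Dict String Int :=
  PySem.Dict.mk [("njobs", a), ("nrun", b), ("nq", c), ("nsusp", d),
                 ("nexiting", e), ("nheld", f), ("nmoving", g), ("nwait", h)]

def ind (p : Prop) [Decidable p] : Int := if p then 1 else 0

-- A's per-line step, restricted to the matched case: dict update as a function of the status letter
def statStep (sd : PySem.Dict String Int) (s : String) : PySem.Dict String Int :=
  let sd := sd.modify "njobs" 0 (· + 1)
  if s == "R" then sd.modify "nrun" 0 (· + 1)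
  else if s == "Q" then sd.modify "nq" 0 (· + 1)
  else if s == "S" then sd.modify "nsusp" 0 (· + 1)
  else if s == "E" then sd.modify "nexiting" 0 (· + 1)
  else if s == "H" then sd.modify "nheld" 0 (· + 1)
  else if s == "T" then sd.modify "nmoving" 0 (· + 1)
  else if s == "W" then sd.modify "nwait" 0 (· + 1)
  else sd

lemma aStep_eq (username line : String) (sd : PySem.Dict String Int) :
    aStep username sd line =
      (let ls := PySem.Str.split₀ line
       if 11 ≤ ls.length ∧ ls.getD 1 "" == username then statStep sd (ls.getD 9 "") else sd) := by
  unfold aStep statStep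
  dsimp only
  by_cases h1 : 11 ≤ (PySem.Str.split₀ line).length
  · by_cases h2 : ((PySem.Str.split₀ line).getD 1 "" == username) = true
    · rw [if_pos h1, if_pos h2, if_pos (show _ ∧ _ from ⟨h1, h2⟩)]
    · rw [if_pos h1, if_neg h2, if_neg (fun hc => h2 hc.2)]
  · rw [if_neg h1, if_neg (fun hc => h1 hc.1)]

-- A's loop over the raw lines is the loop over the collected status letters
lemma foldl_aStep (sout : List String) (username : String) (sd : PySem.Dict String Int) :
    sout.foldl (aStep username) sd = (pvStatuses sout username).foldl statStep sd := by
  induction sout generalizing sd with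
  | nil => rfl
  | cons line rest ih =>
    rw [List.foldl_cons, aStep_eq, ih]
    unfold pvStatuses
    dsimp only [List.map_cons, List.filterMap_cons]
    by_cases h : 11 ≤ (PySem.Str.split₀ line).length ∧ ((PySem.Str.split₀ line).getD 1 "" == username) = true
    · rw [if_pos h, if_pos h]; rfl
    · rw [if_neg h, if_neg h]

lemma statStep_mkSD (s : String) (a b c d e f g h : Int) :
    statStep (mkSD a b c d e f g h) s =
      mkSD (a + 1) (b + ind (s = "R")) (c + ind (s = "Q")) (d + ind (s = "S"))
           (e + ind (s = "E")) (f + ind (s = "H")) (g + ind (s = "T")) (h + ind (s = "W")) := by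
  unfold statStep
  by_cases hR : s = "R"; · subst hR; simp only [ind, beq_iff_eq, String.reduceEq, reduceIte, add_zero]; rfl
  by_cases hQ : s = "Q"; · subst hQ; simp only [ind, beq_iff_eq, String.reduceEq, reduceIte, add_zero]; rfl
  by_cases hS : s = "S"; · subst hS; simp only [ind, beq_iff_eq, String.reduceEq, reduceIte, add_zero]; rfl
  by_cases hE : s = "E"; · subst hE; simp only [ind, beq_iff_eq, String.reduceEq, reduceIte, add_zero]; rfl
  by_cases hH : s = "H"; · subst hH; simp only [ind, beq_iff_eq, String.reduceEq, reduceIte, add_zero]; rfl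
  by_cases hT : s = "T"; · subst hT; simp only [ind, beq_iff_eq, String.reduceEq, reduceIte, add_zero]; rfl
  by_cases hW : s = "W"; · subst hW; simp only [ind, beq_iff_eq, String.reduceEq, reduceIte, add_zero]; rfl
  simp only [ind, if_neg hR, if_neg hQ, if_neg hS, if_neg hE, if_neg hH, if_neg hT, if_neg hW,
    beq_iff_eq, add_zero]
  rfl

-- the status loop just adds the length and the per-letter counts
lemma foldl_statStep (st : List String) (a b c d e f g h : Int) :
    st.foldl statStep (mkSD a b c d e f g h) =
      mkSD (a + st.length) (b + st.count "R") (c + st.count "Q") (d + st.count "S")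
           (e + st.count "E") (f + st.count "H") (g + st.count "T") (h + st.count "W") := by
  induction st generalizing a b c d e f g h with
  | nil => simp
  | cons s rest ih =>
    rw [List.foldl_cons, statStep_mkSD, ih]
    simp only [mkSD, PySem.Dict.mk.injEq, List.cons.injEq, Prod.mk.injEq, List.count_cons,
      List.length_cons, beq_iff_eq, ind, and_true, true_and]
    push_cast
    split_ifs <;> omega

-- ===== VERDICT (by name: the statement is the Claim_ definition above) =====
theorem GetQstatStats_spec : Claim_equal_GetQstatStats := by
  intro sout username _
  show GetQstatStats sout username = GetQstatStats_alt sout username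
  unfold GetQstatStats
  dsimp only
  rw [show (PySem.Dict.ofList
        [("njobs", 0), ("nrun", 0), ("nq", 0), ("nsusp", 0),
         ("nexiting", 0), ("nheld", 0), ("nmoving", 0), ("nwait", 0)] : PySem.Dict String Int) =
      mkSD 0 0 0 0 0 0 0 0 from rfl]
  rw [foldl_aStep, foldl_statStep]
  have hB : GetQstatStats_alt sout username =
      [("njobs", ((pvStatuses sout username).length : Int)),
       ("nrun", ((pvStatuses sout username).count "R" : Int)),
       ("nq", ((pvStatuses sout username).count "Q" : Int)),
       ("nsusp", ((pvStatuses sout username).count "S" : Int)),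
       ("nexiting", ((pvStatuses sout username).count "E" : Int)),
       ("nheld", ((pvStatuses sout username).count "H" : Int)),
       ("nmoving", ((pvStatuses sout username).count "T" : Int)),
       ("nwait", ((pvStatuses sout username).count "W" : Int))] := rfl
  rw [hB]
  simp [mkSD]
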